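-- pv_equiv track=rewrite | github.com/jjanmo/python101 | algorithm/section2/pb05.py | solution
-- ===== SOURCE A (Python) =====
-- def solution(m, n):
--     sum_dict = {}
--     for i in range(1, m + 1):
--         for j in range(1, n + 1):
--             sum_value = i + j
--             if sum_value in sum_dict:
--                 sum_dict[sum_value] = sum_dict[sum_value] + 1
--             else:
--                 sum_dict[sum_value] = 1
--
--     max_key = max(sum_dict, key=sum_dict.get)
--     max_value = sum_dict[max_key]
--
--     result = []
--     for key, value in sum_dict.items():
--         if max_value == value:
--             result.append(key)
--
--     return result
-- ===== SOURCE B (Python) =====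
-- def solution(m, n):
--     # Closed form: counts of i+j form a trapezoid peaking at min(m, n),
--     # attained exactly for sums min(m,n)+1 .. max(m,n)+1, in ascending order.
--     lo = min(m, n)
--     hi = max(m, n)
--     return list(range(lo + 1, hi + 2))
-- ===== Notes on version B (the rewrite author's own statement) =====
-- stated objective: faster
-- what changed: Replaces the O(m*n) dict-counting double loop with the closed-form answer: the maximal pair-count is attained exactly at sums min(m,n)+1 .. max(m,n)+1, emitted as one range.
import Mathlib
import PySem

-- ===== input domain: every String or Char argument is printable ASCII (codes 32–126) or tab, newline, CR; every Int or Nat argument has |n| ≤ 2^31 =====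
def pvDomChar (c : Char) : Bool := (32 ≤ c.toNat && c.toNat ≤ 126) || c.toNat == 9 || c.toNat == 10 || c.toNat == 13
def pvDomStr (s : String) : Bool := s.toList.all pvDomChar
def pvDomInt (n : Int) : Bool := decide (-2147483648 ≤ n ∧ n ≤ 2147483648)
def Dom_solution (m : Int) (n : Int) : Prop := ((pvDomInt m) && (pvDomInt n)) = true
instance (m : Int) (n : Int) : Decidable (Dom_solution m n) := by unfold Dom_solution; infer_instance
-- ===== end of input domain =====

-- B replaces A's O(m*n) dict-counting double loop by the closed-form range min(m,n)+1 .. max(m,n)+1 (asymptotically faster).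


-- ===== PORT A =====
def solution (m : Int) (n : Int) : List Int :=
  let sum_dict : PySem.Dict Int Int :=
    (PySem.List.pyRange 1 (m + 1) 1).foldl (fun d i =>
      (PySem.List.pyRange 1 (n + 1) 1).foldl (fun d j =>
        let sum_value := i + j
        if d.contains sum_value then d.insert sum_value (d.getD sum_value 0 + 1)
        else d.insert sum_value 1) d) PySem.Dict.empty
  match PySem.List.max? sum_dict.keys (fun k => sum_dict.getD k 0) with
  | none => []   -- Python: max() on an empty dict raises ValueError; excluded by Pre_solution
  | some max_key =>
    let max_value := sum_dict.getD max_key 0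
    sum_dict.items.foldl (fun result kv =>
      if max_value == kv.2 then result ++ [kv.1] else result) []

-- ===== PORT B =====
def solution_alt (m : Int) (n : Int) : List Int :=
  PySem.List.pyRange (min m n + 1) (max m n + 2) 1

-- ===== PRECONDITION & SPEC =====
-- A raises ValueError (max() of an empty dict) when m ≤ 0 or n ≤ 0; exactly those inputs are excluded.
def Pre_solution (m : Int) (n : Int) : Prop := 1 ≤ m ∧ 1 ≤ n
instance (m : Int) (n : Int) : Decidable (Pre_solution m n) := by unfold Pre_solution; infer_instance
def pvWitness_solution : Int × Int := (3, 2)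
def Spec_solution (m : Int) (n : Int) (out : List Int) : Prop := out = solution_alt m n
instance (m : Int) (n : Int) (out : List Int) : Decidable (Spec_solution m n out) := by unfold Spec_solution; infer_instance

-- ===== CLAIM (what is proved, stated in full; the proofs are below) =====
def Claim_equal_solution : Prop := ∀ (m : Int) (n : Int), Dom_solution m n → Pre_solution m n → Spec_solution m n (solution m n)

-- ===== LEMMAS AND PROOFS =====

-- the flattened list of all pair sums i+j, in A's traversal order
def pvL (m n : Int) : List Int :=
  (PySem.List.pyRange 1 (m + 1) 1).flatMap (fun i => (PySem.List.pyRange 1 (n + 1) 1).map (fun j => i + j))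

lemma map_add_pyRange (i a b : Int) :
    (PySem.List.pyRange a b 1).map (fun j => i + j) = PySem.List.pyRange (a + i) (b + i) 1 := by
  rw [PySem.List.pyRange_one, PySem.List.pyRange_one, List.map_map]
  have h : (b + i - (a + i)).toNat = (b - a).toNat := by omega
  rw [h]
  exact List.map_congr_left (fun k _ => by simp [Function.comp]; ring)

lemma count_pyRange (a b s : Int) :
    ((PySem.List.pyRange a b 1).count s : Int) = if a ≤ s ∧ s < b then 1 else 0 := by
  by_cases h : a ≤ s ∧ s < b
  · rw [if_pos h]
    exact_mod_cast List.count_eq_one_of_mem (PySem.List.nodup_pyRange_one a b)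
      ((PySem.List.mem_pyRange_one).2 h)
  · rw [if_neg h]
    exact_mod_cast List.count_eq_zero_of_not_mem (fun hm => h ((PySem.List.mem_pyRange_one).1 hm))

lemma foldl_flatMap_helper {α β γ : Type} (l : List α) (g : α → List β) (f : γ → β → γ) (init : γ) :
    (l.flatMap g).foldl f init = l.foldl (fun a x => (g x).foldl f a) init := by
  induction l generalizing init with
  | nil => rfl
  | cons x xs ih => simp [List.flatMap_cons, List.foldl_append, ih]

lemma count_pvL (n s : Int) (hn : 1 ≤ n) : ∀ m, 1 ≤ m →
    ((pvL m n).count s : Int) = max (min (m + 1) s - max 1 (s - n)) 0 := by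
  intro m hm
  induction m, hm using Int.le_induction with
  | base =>
    have h1 : PySem.List.pyRange 1 (1 + 1) 1 = [1] := PySem.List.pyRange_one_singleton 1
    simp only [pvL, h1, List.flatMap_cons, List.flatMap_nil, List.append_nil]
    rw [map_add_pyRange, count_pyRange]
    split_ifs with h <;> omega
  | succ m hm ih =>
    have hsplit : PySem.List.pyRange 1 (m + 1 + 1) 1 = PySem.List.pyRange 1 (m + 1) 1 ++ [m + 1] :=
      PySem.List.pyRange_one_succ_right (by omega)
    have hL : pvL (m + 1) n = pvL m n ++ (PySem.List.pyRange 1 (n + 1) 1).map (fun j => (m + 1) + j) := by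
      simp [pvL, hsplit, List.flatMap_append]
    rw [hL, List.count_append, map_add_pyRange]
    push_cast
    rw [ih, count_pyRange]
    split_ifs with h <;> omega

lemma foldl_add_of_mem (s : PySem.Set Int) (xs : List Int) (h : ∀ x ∈ xs, x ∈ s) :
    xs.foldl PySem.Set.add s = s := by
  induction xs with
  | nil => rfl
  | cons x xs ih =>
    have hx : PySem.Set.add s x = s := by
      simp [PySem.Set.add, PySem.Set.contains, h x (List.mem_cons_self)]
    rw [List.foldl_cons, hx]
    exact ih (fun y hy => h y (List.mem_cons_of_mem _ hy))

lemma foldl_add_nodup (xs : List Int) : ∀ (s : PySem.Set Int), (s ++ xs).Nodup →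
    xs.foldl PySem.Set.add s = s ++ xs := by
  induction xs with
  | nil => intro s _; simp
  | cons x xs ih =>
    intro s h
    have hx : x ∉ s := by
      intro hmem
      exact (List.disjoint_of_nodup_append h) hmem List.mem_cons_self
    have hadd : PySem.Set.add s x = s ++ [x] := by
      simp [PySem.Set.add, PySem.Set.contains, hx]
    rw [List.foldl_cons, hadd, ih (s ++ [x]) (by simpa using h)]
    simp

lemma ofList_pvL (n : Int) (hn : 1 ≤ n) : ∀ m, 1 ≤ m →
    PySem.Set.ofList (pvL m n) = PySem.List.pyRange 2 (m + n + 1) 1 := by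
  intro m hm
  induction m, hm using Int.le_induction with
  | base =>
    have h1 : PySem.List.pyRange 1 (1 + 1) 1 = [1] := PySem.List.pyRange_one_singleton 1
    have hL1 : pvL 1 n = PySem.List.pyRange 2 (1 + n + 1) 1 := by
      simp only [pvL, h1, List.flatMap_cons, List.flatMap_nil, List.append_nil]
      rw [map_add_pyRange, show (1 : Int) + 1 = 2 from by norm_num,
        show n + 1 + 1 = 1 + n + 1 from by ring]
    rw [hL1, PySem.Set.ofList_eq_foldl]
    have := foldl_add_nodup (PySem.List.pyRange 2 (1 + n + 1) 1) []
      (by simpa using PySem.List.nodup_pyRange_one 2 (1 + n + 1))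
    simpa using this
  | succ m hm ih =>
    have hsplit : PySem.List.pyRange 1 (m + 1 + 1) 1 = PySem.List.pyRange 1 (m + 1) 1 ++ [m + 1] :=
      PySem.List.pyRange_one_succ_right (by omega)
    have hL : pvL (m + 1) n = pvL m n ++ PySem.List.pyRange (1 + (m + 1)) (n + 1 + (m + 1)) 1 := by
      simp [pvL, hsplit, List.flatMap_append, map_add_pyRange]
    have hrow : PySem.List.pyRange (1 + (m + 1)) (n + 1 + (m + 1)) 1 =
        PySem.List.pyRange (m + 2) (m + n + 1) 1 ++ [m + n + 1] := by
      rw [show (1 : Int) + (m + 1) = m + 2 from by ring,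
        show n + 1 + (m + 1) = (m + n + 1) + 1 from by ring,
        PySem.List.pyRange_one_succ_right (by omega)]
    rw [hL, PySem.Set.ofList_eq_foldl, List.foldl_append, ← PySem.Set.ofList_eq_foldl, ih, hrow,
      List.foldl_append]
    rw [foldl_add_of_mem (PySem.List.pyRange 2 (m + n + 1) 1) (PySem.List.pyRange (m + 2) (m + n + 1) 1)
      (fun x hx => by rw [PySem.List.mem_pyRange_one] at hx ⊢; omega)]
    have hnot : (m + n + 1) ∉ PySem.List.pyRange 2 (m + n + 1) 1 := by
      rw [PySem.List.mem_pyRange_one]; omega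
    rw [List.foldl_cons, List.foldl_nil]
    simp only [PySem.Set.add, PySem.Set.contains]
    rw [if_neg (by simp [hnot])]
    rw [← PySem.List.pyRange_one_succ_right (by omega : (2 : Int) ≤ m + n + 1)]
    congr 1; ring

lemma filter_interval (a b c d : Int) :
    (PySem.List.pyRange a b 1).filter (fun x => decide (c ≤ x ∧ x ≤ d)) =
      PySem.List.pyRange (max a c) (min b (d + 1)) 1 := by
  have hperm : List.Perm ((PySem.List.pyRange a b 1).filter (fun x => decide (c ≤ x ∧ x ≤ d)))
      (PySem.List.pyRange (max a c) (min b (d + 1)) 1) := by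
    rw [List.perm_ext_iff_of_nodup ((PySem.List.nodup_pyRange_one a b).filter _)
      (PySem.List.nodup_pyRange_one _ _)]
    intro x
    simp only [List.mem_filter, PySem.List.mem_pyRange_one, decide_eq_true_eq]
    omega
  exact hperm.eq_of_pairwise (fun x y _ _ hxy hyx => absurd hyx (not_lt.2 hxy.le))
    ((PySem.List.pairwise_lt_pyRange_one a b).filter _)
    (PySem.List.pairwise_lt_pyRange_one _ _)

lemma dict_eq (m n : Int) :
    ((PySem.List.pyRange 1 (m + 1) 1).foldl (fun d i =>
      (PySem.List.pyRange 1 (n + 1) 1).foldl (fun d j =>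
        let sum_value := i + j
        if d.contains sum_value then d.insert sum_value (d.getD sum_value 0 + 1)
        else d.insert sum_value 1) d) (PySem.Dict.empty : PySem.Dict Int Int)) =
      PySem.Dict.counter (pvL m n) := by
  have hbody : ∀ (d : PySem.Dict Int Int) (s : Int),
      (if d.contains s then d.insert s (d.getD s 0 + 1) else d.insert s 1) =
        d.insert s (d.getD s 0 + 1) := by
    intro d s
    by_cases h : d.contains s
    · rw [if_pos h]
    · rw [if_neg h, PySem.Dict.getD_of_not_contains d 0 (by simpa using h)]
      norm_num
  calc
    _ = (PySem.List.pyRange 1 (m + 1) 1).foldl (fun d i =>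
          ((PySem.List.pyRange 1 (n + 1) 1).map (fun j => i + j)).foldl
            (fun d s => d.insert s (d.getD s 0 + 1)) d) (PySem.Dict.empty : PySem.Dict Int Int) := by
      apply PySem.List.foldl_congr_mem
      intro d i _
      rw [List.foldl_map]
      apply PySem.List.foldl_congr_mem
      intro d' j _
      exact hbody d' (i + j)
    _ = (pvL m n).foldl (fun d s => d.insert s (d.getD s 0 + 1)) PySem.Dict.empty := by
      rw [pvL, foldl_flatMap_helper]
    _ = PySem.Dict.counter (pvL m n) := PySem.Dict.foldl_insert_getD_add_one_eq_counter _


-- ===== VERDICT (by name: the statement is the Claim_ definition above) =====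
theorem solution_spec : Claim_equal_solution := by
  intro m n _ hpre
  obtain ⟨hm, hn⟩ := hpre
  simp only [Spec_solution, solution, solution_alt]
  rw [dict_eq m n]
  have hkeys : (PySem.Dict.counter (pvL m n)).keys = PySem.List.pyRange 2 (m + n + 1) 1 := by
    rw [PySem.Dict.keys_counter]; exact ofList_pvL n hn m hm
  have hgetD : ∀ s : Int, (PySem.Dict.counter (pvL m n)).getD s 0 =
      max (min (m + 1) s - max 1 (s - n)) 0 := by
    intro s
    rw [PySem.Dict.getD_counter]
    exact count_pvL n s hn m hm
  cases hmax : PySem.List.max? (PySem.Dict.counter (pvL m n)).keys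
      (fun k => (PySem.Dict.counter (pvL m n)).getD k 0) with
  | none =>
    exfalso
    have hnil := (PySem.List.max?_eq_none_iff _ _).1 hmax
    rw [hkeys] at hnil
    have h2 : (2 : Int) ∈ PySem.List.pyRange 2 (m + n + 1) 1 :=
      PySem.List.mem_pyRange_one.2 ⟨le_refl _, by omega⟩
    rw [hnil] at h2
    exact absurd h2 (List.not_mem_nil)
  | some k =>
    have hk_max := PySem.List.max?_isMax hmax
    have hmaxv : (PySem.Dict.counter (pvL m n)).getD k 0 = min m n := by
      have hub : (PySem.Dict.counter (pvL m n)).getD k 0 ≤ min m n := by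
        rw [hgetD]; omega
      have hmem : (min m n + 1) ∈ (PySem.Dict.counter (pvL m n)).keys := by
        rw [hkeys]; exact PySem.List.mem_pyRange_one.2 ⟨by omega, by omega⟩
      have hlb := hk_max _ hmem
      rw [hgetD (min m n + 1)] at hlb
      omega
    rw [PySem.Dict.items_counter, ofList_pvL n hn m hm]
    dsimp only
    rw [PySem.List.foldl_append_if
      (p := fun kv : Int × Int => ((PySem.Dict.counter (pvL m n)).getD k 0 == kv.2))
      (f := Prod.fst)]
    rw [List.filter_map, List.map_map, List.nil_append]
    rw [show (Prod.fst ∘ fun s : Int => (s, ((pvL m n).count s : Int))) = id from funext fun s => rfl,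
      List.map_id]
    have hfc : (PySem.List.pyRange 2 (m + n + 1) 1).filter
          ((fun kv : Int × Int => ((PySem.Dict.counter (pvL m n)).getD k 0 == kv.2)) ∘
            (fun s : Int => (s, ((pvL m n).count s : Int)))) =
        (PySem.List.pyRange 2 (m + n + 1) 1).filter
          (fun x => decide (min m n + 1 ≤ x ∧ x ≤ max m n + 1)) := by
      apply List.filter_congr
      intro s hs
      rw [PySem.List.mem_pyRange_one] at hs
      simp only [Function.comp_apply, hmaxv]
      have hc : ((pvL m n).count s : Int) = max (min (m + 1) s - max 1 (s - n)) 0 :=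
        count_pvL n s hn m hm
      rw [Bool.beq_eq_decide_eq, decide_eq_decide, hc]
      omega
    rw [hfc, filter_interval]
    rw [show max 2 (min m n + 1) = min m n + 1 from by omega,
      show min (m + n + 1) (max m n + 1 + 1) = max m n + 2 from by omega]
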